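-- pv_equiv track=rewrite | github.com/geobtaa/harvest-operations | harvesters/oai_qdc.py | oai_select_landing_page
-- ===== SOURCE A (Python) =====
-- def oai_select_landing_page(identifiers):
--     http_identifiers = [
--         value
--         for value in identifiers
--         if value.lower().startswith(("http://", "https://"))
--     ]
--     preferred_patterns = ("/cdm/ref/", "/collection/", "/node/")
--     for pattern in preferred_patterns:
--         for value in http_identifiers:
--             if pattern in value:
--                 return value
--     for value in http_identifiers:
--         if "_foxml" not in value.lower():
--             return value
--     return ""
-- ===== SOURCE B (Python) =====
-- def oai_select_landing_page(identifiers):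
--     patterns = ("/cdm/ref/", "/collection/", "/node/")
--     best = None  # (rank, value); lower rank wins, earliest position wins ties
--     for value in identifiers:
--         if not value.lower().startswith(("http://", "https://")):
--             continue
--         rank = next((i for i, p in enumerate(patterns) if p in value), None)
--         if rank is None and "_foxml" not in value.lower():
--             rank = 3
--         if rank is not None and (best is None or rank < best[0]):
--             best = (rank, value)
--     return best[1] if best is not None else ""
-- ===== Notes on version B (the rewrite author's own statement) =====
-- stated objective: alternative
-- what changed: A's three-pass pattern-priority search (outer loop over patterns, inner scans, plus a separate fallback loop over a prebuilt http-filtered list) is replaced by a single left-to-right pass that assigns each http identifier a rank (first matching pattern index, 3 for the no-foxml fallback) and keeps the lowest-rank earliest candidate.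
import Mathlib
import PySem

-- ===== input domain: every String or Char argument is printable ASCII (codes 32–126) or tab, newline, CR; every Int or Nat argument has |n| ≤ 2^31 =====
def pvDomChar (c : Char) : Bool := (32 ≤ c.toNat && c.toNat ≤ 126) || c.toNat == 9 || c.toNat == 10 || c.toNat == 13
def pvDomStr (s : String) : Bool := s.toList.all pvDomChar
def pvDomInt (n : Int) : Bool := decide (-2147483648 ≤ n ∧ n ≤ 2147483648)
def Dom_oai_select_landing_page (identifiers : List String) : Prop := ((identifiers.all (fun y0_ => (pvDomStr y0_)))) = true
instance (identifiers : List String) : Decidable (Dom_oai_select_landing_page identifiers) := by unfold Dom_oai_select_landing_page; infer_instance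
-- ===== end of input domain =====

-- B replaces A's pattern-outer/value-inner loops and fallback loop by ONE pass that keeps
-- the best-ranked candidate seen so far (objective: alternative decomposition, single scan).

-- ===== PORT A =====
def oaiHttp (value : String) : Bool :=
  PySem.Str.startswith (PySem.Str.lower value) "http://" ||
  PySem.Str.startswith (PySem.Str.lower value) "https://"

-- 'for pattern in preferred_patterns: for value in http: if pattern in value: return value'
def oaiPatternLoop : List String → List String → Option String
  | [], _ => none
  | p :: ps, hs =>
    match hs.find? (fun value => PySem.Str.isIn p value) with
    | some v => some v
    | none => oaiPatternLoop ps hs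

def oai_select_landing_page (identifiers : List String) : String :=
  let http_identifiers := identifiers.filter (fun value => oaiHttp value)
  match oaiPatternLoop ["/cdm/ref/", "/collection/", "/node/"] http_identifiers with
  | some v => v
  | none =>
    match http_identifiers.find? (fun value => !(PySem.Str.isIn "_foxml" (PySem.Str.lower value))) with
    | some v => v
    | none => ""

-- ===== PORT B =====
-- next((i for i, p in enumerate(patterns) if p in value), None)
def oaiFirstIdx : List String → Nat → String → Option Nat
  | [], _, _ => none
  | p :: ps, i, value =>
    if PySem.Str.isIn p value then some i else oaiFirstIdx ps (i + 1) value

def oaiRank (value : String) : Option Nat :=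
  match oaiFirstIdx ["/cdm/ref/", "/collection/", "/node/"] 0 value with
  | some i => some i
  | none =>
    if !(PySem.Str.isIn "_foxml" (PySem.Str.lower value)) then some 3 else none

-- loop body: skip non-http, else update best if strictly lower rank
def oaiAltBody (best : Option (Nat × String)) (value : String) : Option (Nat × String) :=
  match oaiRank value with
  | none => best
  | some r =>
    match best with
    | none => some (r, value)
    | some (rb, vb) => if r < rb then some (r, value) else some (rb, vb)

def oaiAltStep (best : Option (Nat × String)) (value : String) : Option (Nat × String) :=
  if !(PySem.Str.startswith (PySem.Str.lower value) "http://" ||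
       PySem.Str.startswith (PySem.Str.lower value) "https://") then best
  else oaiAltBody best value

def oai_select_landing_page_alt (identifiers : List String) : String :=
  match identifiers.foldl oaiAltStep none with
  | some (_, v) => v
  | none => ""

-- ===== PRECONDITION & SPEC =====
def Spec_oai_select_landing_page (identifiers : List String) (out : String) : Prop := out = oai_select_landing_page_alt identifiers
instance (identifiers : List String) (out : String) : Decidable (Spec_oai_select_landing_page identifiers out) := by unfold Spec_oai_select_landing_page; infer_instance

-- ===== CLAIM (what is proved, stated in full; the proofs are below) =====
def Claim_equal_oai_select_landing_page : Prop := ∀ (identifiers : List String), Dom_oai_select_landing_page identifiers → Spec_oai_select_landing_page identifiers (oai_select_landing_page identifiers)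

-- ===== LEMMAS AND PROOFS =====

-- left-biased min-by-rank merge
def oaiMerge : Option (Nat × String) → Option (Nat × String) → Option (Nat × String)
  | b, none => b
  | none, s => s
  | some (rb, vb), some (r, v) => if r < rb then some (r, v) else some (rb, vb)

def oaiSel : List String → Option (Nat × String)
  | [] => none
  | v :: l => oaiMerge ((oaiRank v).map (fun r => (r, v))) (oaiSel l)

-- A's chained searches, tagged with the pattern index
def oaiChain (hs : List String) : Option (Nat × String) :=
  match hs.find? (fun v => PySem.Str.isIn "/cdm/ref/" v) with
  | some w => some (0, w)
  | none =>
    match hs.find? (fun v => PySem.Str.isIn "/collection/" v) with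
    | some w => some (1, w)
    | none =>
      match hs.find? (fun v => PySem.Str.isIn "/node/" v) with
      | some w => some (2, w)
      | none =>
        match hs.find? (fun v => !(PySem.Str.isIn "_foxml" (PySem.Str.lower v))) with
        | some w => some (3, w)
        | none => none

lemma oaiMerge_none_left (s : Option (Nat × String)) : oaiMerge none s = s := by
  cases s <;> rfl

lemma oaiMerge_assoc (a b c : Option (Nat × String)) :
    oaiMerge (oaiMerge a b) c = oaiMerge a (oaiMerge b c) := by
  rcases a with _ | ⟨ra, va⟩ <;> rcases b with _ | ⟨rb, vb⟩ <;> rcases c with _ | ⟨rc, vc⟩ <;>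
    try rfl
  · exact (oaiMerge_none_left _).symm
  by_cases h1 : rb < ra <;> by_cases h2 : rc < rb <;> by_cases h3 : rc < ra <;>
    simp [oaiMerge, h1, h2, h3] <;> first | rfl | omega

lemma oaiAltBody_eq_merge (b : Option (Nat × String)) (v : String) :
    oaiAltBody b v = oaiMerge b ((oaiRank v).map (fun r => (r, v))) := by
  rcases h : oaiRank v with _ | r <;> rcases b with _ | ⟨rb, vb⟩ <;> simp [oaiAltBody, oaiMerge, h]

lemma foldl_step_eq (l : List String) : ∀ b : Option (Nat × String),
    l.foldl oaiAltStep b = oaiMerge b (oaiSel (l.filter (fun v => oaiHttp v))) := by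
  induction l with
  | nil => intro b; cases b <;> rfl
  | cons v l ih =>
    intro b
    by_cases h : oaiHttp v = true
    · have h' : PySem.Chars.startswith (PySem.Chars.lower v.toList) ['h','t','t','p',':','/','/'] = true ∨
          PySem.Chars.startswith (PySem.Chars.lower v.toList) ['h','t','t','p','s',':','/','/'] = true := by
        simpa [oaiHttp] using h
      rcases h' with h' | h' <;>
        simp [List.foldl_cons, oaiAltStep, h', h, oaiSel, ih, oaiAltBody_eq_merge, oaiMerge_assoc]
    · simp at h
      have h1 : PySem.Chars.startswith (PySem.Chars.lower v.toList) ['h','t','t','p',':','/','/'] = false ∧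
          PySem.Chars.startswith (PySem.Chars.lower v.toList) ['h','t','t','p','s',':','/','/'] = false := by
        simpa [oaiHttp] using h
      simp [List.foldl_cons, oaiAltStep, h1.1, h1.2, h, ih]

lemma oaiRank_eq (v : String) :
    oaiRank v =
      if PySem.Str.isIn "/cdm/ref/" v then some 0
      else if PySem.Str.isIn "/collection/" v then some 1
      else if PySem.Str.isIn "/node/" v then some 2
      else if !(PySem.Str.isIn "_foxml" (PySem.Str.lower v)) then some 3
      else none := by
  cases h0 : PySem.Str.isIn "/cdm/ref/" v <;>
  cases h1 : PySem.Str.isIn "/collection/" v <;>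
  cases h2 : PySem.Str.isIn "/node/" v <;>
    simp_all [oaiRank, oaiFirstIdx]

set_option maxHeartbeats 1000000 in
lemma oaiSel_eq_chain : ∀ hs : List String, oaiSel hs = oaiChain hs := by
  intro hs
  induction hs with
  | nil => rfl
  | cons v hs ih =>
    cases h0 : PySem.Chars.isIn ['/', 'c', 'd', 'm', '/', 'r', 'e', 'f', '/'] v.toList <;>
    cases h1 : PySem.Chars.isIn ['/', 'c', 'o', 'l', 'l', 'e', 'c', 't', 'i', 'o', 'n', '/'] v.toList <;>
    cases h2 : PySem.Chars.isIn ['/', 'n', 'o', 'd', 'e', '/'] v.toList <;>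
    cases hf : PySem.Chars.isIn ['_', 'f', 'o', 'x', 'm', 'l'] (PySem.Chars.lower v.toList) <;>
    · rcases g0 : List.find? (fun v => PySem.Chars.isIn ['/', 'c', 'd', 'm', '/', 'r', 'e', 'f', '/'] v.toList) hs with _ | w0 <;>
      rcases g1 : List.find? (fun v => PySem.Chars.isIn ['/', 'c', 'o', 'l', 'l', 'e', 'c', 't', 'i', 'o', 'n', '/'] v.toList) hs with _ | w1 <;>
      rcases g2 : List.find? (fun v => PySem.Chars.isIn ['/', 'n', 'o', 'd', 'e', '/'] v.toList) hs with _ | w2 <;>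
      rcases gf2 : List.find? (fun v => !PySem.Chars.isIn ['_', 'f', 'o', 'x', 'm', 'l'] (PySem.Chars.lower v.toList)) hs with _ | wf <;>
        simp [oaiSel, oaiChain, ih, oaiRank_eq, h0, h1, h2, hf, g0, g1, g2, gf2, oaiMerge]

lemma oaiA_eq_chain (l : List String) :
    oai_select_landing_page l =
      match oaiChain (l.filter (fun v => oaiHttp v)) with
      | some (_, v) => v
      | none => "" := by
  unfold oai_select_landing_page oaiChain
  simp only [oaiPatternLoop]
  rcases g0 : (l.filter (fun v => oaiHttp v)).find? (fun v => PySem.Str.isIn "/cdm/ref/" v) with _ | w0 <;>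
  rcases g1 : (l.filter (fun v => oaiHttp v)).find? (fun v => PySem.Str.isIn "/collection/" v) with _ | w1 <;>
  rcases g2 : (l.filter (fun v => oaiHttp v)).find? (fun v => PySem.Str.isIn "/node/" v) with _ | w2 <;>
  rcases gf : (l.filter (fun v => oaiHttp v)).find? (fun v => !(PySem.Str.isIn "_foxml" (PySem.Str.lower v))) with _ | wf <;>
    simp only [g0, g1, g2, gf]

-- ===== VERDICT (by name: the statement is the Claim_ definition above) =====
theorem oai_select_landing_page_spec : Claim_equal_oai_select_landing_page := by
  intro l _
  unfold Spec_oai_select_landing_page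
  rw [oaiA_eq_chain]
  unfold oai_select_landing_page_alt
  rw [foldl_step_eq, oaiMerge_none_left, oaiSel_eq_chain]
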